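-- pv_equiv track=rewrite | github.com/Ratan24/interview-embedding-benchmark | plot_hazard.py | candidate_word_count
-- ===== SOURCE A (Python) =====
-- def candidate_word_count(messages):
--     """Count whitespace-separated words across candidate turns only."""
--     words = 0
--     for msg in messages:
--         if msg.get("role") == "user":
--             content = (msg.get("content") or "").strip()
--             if content:
--                 words += len(content.split())
--     return words
-- ===== SOURCE B (Python) =====
-- def candidate_word_count(messages):
--     """Count whitespace-separated words across candidate turns only."""
--     total = 0
--     for msg in messages:
--         if msg.get("role") != "user":
--             continue
--         prev_space = True
--         for ch in (msg.get("content") or ""):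
--             is_space = ch.isspace()
--             if prev_space and not is_space:
--                 total += 1
--             prev_space = is_space
--     return total
-- ===== Notes on version B (the rewrite author's own statement) =====
-- stated objective: alternative
-- what changed: Replaces A's split()-based counting (which materialises a list of word substrings per message) with a character-level state machine that scans each user content once and counts whitespace-to-nonwhitespace transitions, never allocating any substrings.
import Mathlib
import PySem

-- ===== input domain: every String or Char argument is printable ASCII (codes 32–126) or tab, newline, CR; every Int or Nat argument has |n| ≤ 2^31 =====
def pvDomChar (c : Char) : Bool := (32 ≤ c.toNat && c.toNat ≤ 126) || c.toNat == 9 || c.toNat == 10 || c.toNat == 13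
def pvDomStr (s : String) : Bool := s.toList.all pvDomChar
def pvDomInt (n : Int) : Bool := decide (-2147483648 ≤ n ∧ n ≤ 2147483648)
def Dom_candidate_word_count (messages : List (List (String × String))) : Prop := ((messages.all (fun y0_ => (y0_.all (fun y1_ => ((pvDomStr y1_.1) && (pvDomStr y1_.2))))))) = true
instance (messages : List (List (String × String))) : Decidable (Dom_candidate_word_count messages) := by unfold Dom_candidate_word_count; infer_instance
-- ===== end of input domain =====

-- B replaces A's split()-based counting with a character-level state machine: it scans each
-- user content once and counts whitespace-to-nonwhitespace transitions, allocating no substrings.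

-- ===== PORT A =====
-- literal port of A: running word counter, per message check role, strip content, guard, add len(split())
def candidate_word_count (messages : List (List (String × String))) : Int :=
  messages.foldl (fun words msg =>
    if (PySem.Dict.mk msg).get? "role" = some "user" then
      let content := PySem.Str.strip ((PySem.Dict.mk msg).getD "content" "")
      if content ≠ "" then words + ((PySem.Str.split₀ content).length : Int) else words
    else words) 0

-- ===== PORT B =====
-- literal port of B: skip non-user messages; scan the content's characters with a
-- (total, prev_space) state, incrementing at each whitespace→nonwhitespace transition
def candidate_word_count_alt (messages : List (List (String × String))) : Int :=
  messages.foldl (fun total msg =>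
    if (PySem.Dict.mk msg).get? "role" ≠ some "user" then total
    else
      (((PySem.Dict.mk msg).getD "content" "").toList.foldl
        (fun (st : Int × Bool) ch =>
          let is_space := PySem.Chars.isspace ch
          ((if st.2 && !is_space then st.1 + 1 else st.1), is_space))
        (total, true)).1) 0

-- ===== PRECONDITION & SPEC =====
def Spec_candidate_word_count (messages : List (List (String × String))) (out : Int) : Prop := out = candidate_word_count_alt messages
instance (messages : List (List (String × String))) (out : Int) : Decidable (Spec_candidate_word_count messages out) := by unfold Spec_candidate_word_count; infer_instance

-- ===== CLAIM (what is proved, stated in full; the proofs are below) =====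
def Claim_equal_candidate_word_count : Prop := ∀ (messages : List (List (String × String))), Dom_candidate_word_count messages → Spec_candidate_word_count messages (candidate_word_count messages)

-- ===== LEMMAS AND PROOFS =====

-- word count of a character list
def pvWc (s : List Char) : Nat := (PySem.Chars.split₀ s).length

-- recursive word-start counter: pvScan s prev = number of whitespace→nonwhitespace
-- transitions in s, given that the character before s was whitespace iff prev
def pvScan : List Char → Bool → Nat
  | [], _ => 0
  | c :: r, prev =>
    if PySem.Chars.isspace c then pvScan r true
    else (if prev then 1 else 0) + pvScan r false

-- B's inner character fold computes t + pvScan s p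
theorem pvInner (s : List Char) : ∀ (t : Int) (p : Bool),
    (s.foldl (fun (st : Int × Bool) ch =>
        let is_space := PySem.Chars.isspace ch
        ((if st.2 && !is_space then st.1 + 1 else st.1), is_space)) (t, p)).1
      = t + (pvScan s p : Int) := by
  induction s with
  | nil => intro t p; simp [pvScan]
  | cons c r ih =>
    intro t p
    rw [List.foldl_cons]
    refine (ih _ _).trans ?_
    by_cases hs : PySem.Chars.isspace c <;> cases p <;>
      simp [pvScan, hs] <;> push_cast <;> ring

-- one-step unfoldings of split₀.go (kept as rw-lemmas; simp-unfolding go loops)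

theorem pvGo_nil (cur : List Char) (acc : List (List Char)) :
    PySem.Chars.split₀.go [] cur acc =
      (if cur.isEmpty then acc.reverse else (cur.reverse :: acc).reverse) := rfl

theorem pvGo_cons (c : Char) (rest cur : List Char) (acc : List (List Char)) :
    PySem.Chars.split₀.go (c :: rest) cur acc =
      (if PySem.Chars.isspace c then
        (if cur.isEmpty then PySem.Chars.split₀.go rest [] acc
         else PySem.Chars.split₀.go rest [] (cur.reverse :: acc))
       else PySem.Chars.split₀.go rest (c :: cur) acc) := rfl

-- the number of words split₀.go produces is the accumulator's plus the scan count
theorem pvGo_len (s : List Char) : ∀ (cur : List Char) (acc : List (List Char)),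
    (PySem.Chars.split₀.go s cur acc).length =
      acc.length + (if cur.isEmpty then pvScan s true else 1 + pvScan s false) := by
  induction s with
  | nil =>
    intro cur acc
    rw [pvGo_nil]
    by_cases h : cur.isEmpty <;> simp [h, pvScan]
  | cons c rest ih =>
    intro cur acc
    rw [pvGo_cons]
    by_cases hs : PySem.Chars.isspace c
    · by_cases h : cur.isEmpty
      · simp only [hs, h, if_true]
        rw [ih [] acc]
        simp [pvScan, hs]
      · simp only [hs, h, if_true, Bool.false_eq_true, if_false]
        rw [ih [] (cur.reverse :: acc)]
        simp only [pvScan, hs, if_true, List.isEmpty_nil, List.length_cons]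
        omega
    · simp only [hs, Bool.false_eq_true, if_false]
      rw [ih (c :: cur) acc]
      by_cases h : cur.isEmpty <;>
        simp only [h, pvScan, hs, List.isEmpty_cons, Bool.false_eq_true, if_false, if_true] <;>
        omega

-- pvScan from a whitespace start counts exactly the words of split₀
theorem pvScan_eq_wc (s : List Char) : pvScan s true = pvWc s := by
  unfold pvWc PySem.Chars.split₀
  rw [pvGo_len s [] []]
  simp

-- leading whitespace is ignored by split₀.go with an empty current word
theorem pvGo_lstrip (s : List Char) (acc : List (List Char)) :
    PySem.Chars.split₀.go (List.dropWhile PySem.Chars.isspace s) [] acc =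
      PySem.Chars.split₀.go s [] acc := by
  induction s with
  | nil => rfl
  | cons c rest ih =>
    by_cases hs : PySem.Chars.isspace c
    · rw [List.dropWhile_cons_of_pos hs, ih, pvGo_cons]
      simp [hs]
    · rw [List.dropWhile_cons_of_neg (by simp [hs])]

-- split₀.go on an all-whitespace remainder just flushes the current word
theorem pvGo_allspace (w : List Char) (hw : ∀ c ∈ w, PySem.Chars.isspace c = true) :
    ∀ (cur : List Char) (acc : List (List Char)),
    PySem.Chars.split₀.go w cur acc = PySem.Chars.split₀.go [] cur acc := by
  induction w with
  | nil => intro cur acc; rfl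
  | cons c rest ih =>
    intro cur acc
    have hc := hw c (by simp)
    have hrest : ∀ c ∈ rest, PySem.Chars.isspace c = true := fun c hc => hw c (by simp [hc])
    rw [pvGo_cons, pvGo_nil]
    simp only [hc, if_true]
    by_cases h : cur.isEmpty
    · have hcur : cur = [] := by cases cur <;> simp_all
      subst hcur
      rw [ih hrest [] acc, pvGo_nil]
      simp
    · simp only [h, Bool.false_eq_true, if_false]
      rw [ih hrest [] (cur.reverse :: acc), pvGo_nil]
      simp

-- trailing whitespace is ignored by split₀.go
theorem pvGo_rstrip (w : List Char) (hw : ∀ c ∈ w, PySem.Chars.isspace c = true) :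
    ∀ (l cur : List Char) (acc : List (List Char)),
    PySem.Chars.split₀.go (l ++ w) cur acc = PySem.Chars.split₀.go l cur acc := by
  intro l
  induction l with
  | nil => intro cur acc; simpa using pvGo_allspace w hw cur acc
  | cons c l ih =>
    intro cur acc
    rw [List.cons_append, pvGo_cons, pvGo_cons]
    by_cases hs : PySem.Chars.isspace c
    · by_cases h : cur.isEmpty <;> simp [hs, h, ih]
    · simp [hs, ih]

-- split₀ is unchanged by strip
theorem pvSplit₀_strip (s : List Char) :
    PySem.Chars.split₀ (PySem.Chars.strip s) = PySem.Chars.split₀ s := by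
  unfold PySem.Chars.strip PySem.Chars.rstrip PySem.Chars.lstrip PySem.Chars.split₀
  set t := List.dropWhile PySem.Chars.isspace s with ht
  have hdecomp : t = (List.dropWhile PySem.Chars.isspace t.reverse).reverse ++
      (List.takeWhile PySem.Chars.isspace t.reverse).reverse := by
    calc t = t.reverse.reverse := t.reverse_reverse.symm
    _ = (List.takeWhile PySem.Chars.isspace t.reverse ++
          List.dropWhile PySem.Chars.isspace t.reverse).reverse := by
        rw [List.takeWhile_append_dropWhile]
    _ = _ := by rw [List.reverse_append]
  rw [← pvGo_lstrip s []]
  conv_rhs => rw [← ht, hdecomp]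
  rw [pvGo_rstrip _ (fun c hc => List.mem_takeWhile_imp (by simpa using hc))]

-- A's per-message contribution equals the plain word count of the raw content
theorem pvStep (c : String) :
    (if PySem.Str.strip c ≠ "" then ((PySem.Str.split₀ (PySem.Str.strip c)).length : Int) else 0)
      = (pvWc c.toList : Int) := by
  have hsplit : PySem.Str.split₀ (PySem.Str.strip c)
      = (PySem.Chars.split₀ c.toList).map String.ofList := by
    unfold PySem.Str.split₀ PySem.Str.strip
    rw [String.toList_ofList, pvSplit₀_strip]
  by_cases h : PySem.Str.strip c = ""
  · have hnil : PySem.Chars.split₀ c.toList = [] := by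
      have h0 : PySem.Str.split₀ (PySem.Str.strip c) = [] := by rw [h]; rfl
      rw [hsplit] at h0
      exact List.map_eq_nil_iff.mp h0
    simp [h, pvWc, hnil]
  · simp [h, hsplit, pvWc]

-- the two outer folds agree from any common starting total
theorem pvMain (l : List (List (String × String))) : ∀ (t : Int),
    l.foldl (fun words msg =>
      if (PySem.Dict.mk msg).get? "role" = some "user" then
        let content := PySem.Str.strip ((PySem.Dict.mk msg).getD "content" "")
        if content ≠ "" then words + ((PySem.Str.split₀ content).length : Int) else words
      else words) t
    = l.foldl (fun total msg =>
      if (PySem.Dict.mk msg).get? "role" ≠ some "user" then total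
      else
        (((PySem.Dict.mk msg).getD "content" "").toList.foldl
          (fun (st : Int × Bool) ch =>
            let is_space := PySem.Chars.isspace ch
            ((if st.2 && !is_space then st.1 + 1 else st.1), is_space))
          (total, true)).1) t := by
  induction l with
  | nil => intro t; rfl
  | cons msg rest ih =>
    intro t
    rw [List.foldl_cons, List.foldl_cons, ih]
    congr 1
    by_cases hr : (PySem.Dict.mk msg).get? "role" = some "user"
    · simp only [hr, if_true, ne_eq, not_true_eq_false, if_false]
      rw [pvInner, pvScan_eq_wc]
      have hstep := pvStep ((PySem.Dict.mk msg).getD "content" "")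
      by_cases h : PySem.Str.strip ((PySem.Dict.mk msg).getD "content" "") = ""
      · simp only [h, ne_eq, not_true_eq_false, if_false] at hstep ⊢
        rw [← hstep]; ring
      · simp only [h, ne_eq, not_false_eq_true, if_true] at hstep ⊢
        rw [hstep]
    · simp [hr]

-- ===== VERDICT (by name: the statement is the Claim_ definition above) =====
theorem candidate_word_count_spec : Claim_equal_candidate_word_count := by
  intro messages _
  unfold Spec_candidate_word_count candidate_word_count candidate_word_count_alt
  exact pvMain messages 0
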